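-- pv_equiv track=rewrite | github.com/TreeKangaroo/imu-gait-analysis | KneeAngle/SensorDataProcess2.py | findFTG
-- ===== SOURCE A (Python) =====
-- def findFTG(sensorData, ftgvalue, peak, valley):
--     m=len(peak)
--     result=[]
--     for k in range(m):
--         for j in range(peak[k], valley[k+1]):
--             if sensorData[j]<=ftgvalue:
--                 result.append(j)
--                 break
--
--     return result
-- ===== SOURCE B (Python) =====
-- def findFTG(sensorData, ftgvalue, peak, valley):
--     n = len(sensorData)
--     # backward pass: nxt[i] = first index j >= i with sensorData[j] <= ftgvalue, else n
--     nxt = [n] * (n + 1)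
--     for i in range(n - 1, -1, -1):
--         nxt[i] = i if sensorData[i] <= ftgvalue else nxt[i + 1]
--     result = []
--     for k, p in enumerate(peak):
--         v = valley[k + 1]
--         if p < v:
--             cand = nxt[p]
--             if cand < v:
--                 result.append(cand)
--     return result
-- ===== Notes on version B (the rewrite author's own statement) =====
-- stated objective: faster
-- what changed: Replaces the per-peak linear scan of sensorData with a single backward pass that precomputes a next-qualifying-index table, so each peak is answered by one table lookup.
-- outside the precondition, e.g. on findFTG([5], 10, [-1], [0, 1]): A returns [-1], B returns []; on findFTG([5], 0, [0], [0, 3]): A raises IndexError, B returns [1]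
import Mathlib
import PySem

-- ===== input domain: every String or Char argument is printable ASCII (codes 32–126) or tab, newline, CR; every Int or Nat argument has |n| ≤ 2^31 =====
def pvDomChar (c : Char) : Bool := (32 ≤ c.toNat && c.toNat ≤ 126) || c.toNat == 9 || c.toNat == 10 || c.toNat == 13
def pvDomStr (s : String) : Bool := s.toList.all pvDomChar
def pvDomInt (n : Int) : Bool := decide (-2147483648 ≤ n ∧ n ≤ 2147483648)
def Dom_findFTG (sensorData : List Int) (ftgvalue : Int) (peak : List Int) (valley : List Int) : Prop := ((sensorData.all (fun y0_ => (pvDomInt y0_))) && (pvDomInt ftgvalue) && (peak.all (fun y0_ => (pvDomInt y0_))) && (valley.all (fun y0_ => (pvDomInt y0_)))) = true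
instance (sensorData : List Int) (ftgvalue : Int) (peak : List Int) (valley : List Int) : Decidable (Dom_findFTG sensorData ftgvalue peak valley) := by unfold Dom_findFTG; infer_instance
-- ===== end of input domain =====

-- B replaces A's per-peak linear scan with one backward pass building a next-qualifying-index
-- table plus a constant-time lookup per peak (objective: faster).

-- ===== PORT A =====
-- inner loop 'for j in range(...): if sensorData[j]<=ftgvalue: append j; break' = first hit
def pvScanA (sensorData : List Int) (ftgvalue : Int) : List Int → Option Int
  | [] => none
  | j :: rest =>
      if PySem.List.pyGetD sensorData j 0 ≤ ftgvalue then some j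
      else pvScanA sensorData ftgvalue rest

def findFTG (sensorData : List Int) (ftgvalue : Int) (peak : List Int) (valley : List Int) : List Int :=
  (PySem.List.pyRange 0 peak.length 1).foldl (fun result k =>
    match pvScanA sensorData ftgvalue
        (PySem.List.pyRange (PySem.List.pyGetD peak k 0) (PySem.List.pyGetD valley (k + 1) 0) 1) with
    | some j => result ++ [j]
    | none => result) []

-- ===== PORT B =====
-- backward pass of Source B: element i of the result is i if sensorData[i] ≤ ftgvalue else nxt[i+1]; sentinel n
def pvNxt (ftgvalue : Int) (n : Int) : List Int → Int → List Int
  | [], _ => [n]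
  | x :: xs, i =>
      let rest := pvNxt ftgvalue n xs (i + 1)
      (if x ≤ ftgvalue then i else rest.headD n) :: rest

def findFTG_alt (sensorData : List Int) (ftgvalue : Int) (peak : List Int) (valley : List Int) : List Int :=
  let n : Int := sensorData.length
  let nxt := pvNxt ftgvalue n sensorData 0
  (PySem.List.enumerate peak 0).foldl (fun result kp =>
    let v := PySem.List.pyGetD valley (kp.1 + 1) 0
    if kp.2 < v then
      let cand := PySem.List.pyGetD nxt kp.2 n
      if cand < v then result ++ [cand] else result
    else result) []

-- ===== PRECONDITION & SPEC =====
-- Pre_ excludes exactly: inputs where A raises IndexError (valley shorter than len(peak)+1, or a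
-- nonempty scan range that runs past the end of sensorData with no qualifying sample), and inputs
-- with a negative peak index starting a nonempty range, where Python's negative-index wraparound
-- applies — outside the natural domain of indices (there A may return a negative index).
def Pre_findFTG (sensorData : List Int) (ftgvalue : Int) (peak : List Int) (valley : List Int) : Prop :=
  (peak = [] ∨ peak.length + 1 ≤ valley.length) ∧
  ∀ k < peak.length,
    peak.getD k 0 < valley.getD (k + 1) 0 →
      0 ≤ peak.getD k 0 ∧
      (valley.getD (k + 1) 0 ≤ (sensorData.length : Int) ∨
       ∃ j < sensorData.length, (peak.getD k 0).toNat ≤ j ∧ sensorData.getD j 0 ≤ ftgvalue)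
instance (sensorData : List Int) (ftgvalue : Int) (peak : List Int) (valley : List Int) : Decidable (Pre_findFTG sensorData ftgvalue peak valley) := by unfold Pre_findFTG; infer_instance

def pvWitness_findFTG : List Int × Int × List Int × List Int := ([3, 10, 2], 5, [0, 1], [0, 2, 3])

def Spec_findFTG (sensorData : List Int) (ftgvalue : Int) (peak : List Int) (valley : List Int) (out : List Int) : Prop := out = findFTG_alt sensorData ftgvalue peak valley
instance (sensorData : List Int) (ftgvalue : Int) (peak : List Int) (valley : List Int) (out : List Int) : Decidable (Spec_findFTG sensorData ftgvalue peak valley out) := by unfold Spec_findFTG; infer_instance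

-- ===== CLAIM (what is proved, stated in full; the proofs are below) =====
def Claim_equal_findFTG : Prop := ∀ (sensorData : List Int) (ftgvalue : Int) (peak : List Int) (valley : List Int), Dom_findFTG sensorData ftgvalue peak valley → Pre_findFTG sensorData ftgvalue peak valley → Spec_findFTG sensorData ftgvalue peak valley (findFTG sensorData ftgvalue peak valley)

-- ===== LEMMAS AND PROOFS =====

theorem pvNxt_length (t n : Int) (xs : List Int) (i : Int) :
    (pvNxt t n xs i).length = xs.length + 1 := by
  induction xs generalizing i with
  | nil => simp [pvNxt]
  | cons x xs ih => simp [pvNxt, ih]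

-- the recurrence the table satisfies, read back through getD
theorem pvNxt_getD (t n : Int) (xs : List Int) (i : Int) (q : Nat) :
    (pvNxt t n xs i).getD q n =
      if q < xs.length then
        (if xs.getD q 0 ≤ t then i + q else (pvNxt t n xs i).getD (q + 1) n)
      else n := by
  induction xs generalizing i q with
  | nil =>
      simp only [List.length_nil]
      cases q <;> simp [pvNxt]
  | cons x xs ih =>
      cases q with
      | zero =>
          simp only [pvNxt, List.length_cons]
          have hne : pvNxt t n xs (i + 1) ≠ [] := by
            cases xs <;> simp [pvNxt]
          cases rest : pvNxt t n xs (i + 1) with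
          | nil => exact absurd rest hne
          | cons r rs => simp
      | succ q' =>
      simp only [pvNxt, List.getD_cons_succ, List.length_cons]
      rw [ih (i + 1) q']
      by_cases hq : q' < xs.length
      · simp only [hq, if_true, Nat.add_lt_add_iff_right]
        have : i + 1 + (q' : Int) = i + (q' + 1 : Nat) := by push_cast; ring
        rw [this]
      · simp [hq]

-- nxtAt a ≥ a for a ≤ n (fuel = n - a)
theorem pvNxt_ge (t : Int) (data : List Int) :
    ∀ d a : Nat, a + d = data.length →
      (a : Int) ≤ (pvNxt t (data.length : Int) data 0).getD a (data.length : Int) := by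
  intro d
  induction d with
  | zero =>
      intro a ha
      rw [pvNxt_getD]
      simp [ha.symm ▸ (by omega : ¬ a < a + 0)]
      omega
  | succ d ih =>
      intro a ha
      rw [pvNxt_getD]
      have hlt : a < data.length := by omega
      simp only [hlt, if_true, zero_add]
      split
      · omega
      · have := ih (a + 1) (by omega)
        push_cast at this ⊢
        omega

-- if a qualifying sample exists at index ≥ a, the table entry is < n
theorem pvNxt_lt_of_exists (t : Int) (data : List Int) :
    ∀ d a : Nat, a + d = data.length →
      (∃ j < data.length, a ≤ j ∧ data.getD j 0 ≤ t) →
      (pvNxt t (data.length : Int) data 0).getD a (data.length : Int) < (data.length : Int) := by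
  intro d
  induction d with
  | zero =>
      intro a ha ⟨j, hj, haj, _⟩
      omega
  | succ d ih =>
      intro a ha hex
      have hlt : a < data.length := by omega
      rw [pvNxt_getD]
      simp only [hlt, if_true, zero_add]
      by_cases hle : data.getD a 0 ≤ t
      · simp only [hle, if_true]
        exact_mod_cast hlt
      · simp only [hle, if_false]
        obtain ⟨j, hj, haj, hjt⟩ := hex
        have hja : j ≠ a := by rintro rfl; exact hle hjt
        exact ih (a + 1) (by omega) ⟨j, hj, by omega, hjt⟩

-- the scan over range(a, b) returns the table entry iff it is < b (fuel = n - a; b may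
-- exceed n only when a hit is guaranteed before n)
theorem pvScanA_eq_nxt (t : Int) (data : List Int) :
    ∀ d a : Nat, ∀ b : Int, a + d = data.length →
      (b ≤ (data.length : Int) ∨
        (pvNxt t (data.length : Int) data 0).getD a (data.length : Int) < (data.length : Int)) →
      pvScanA data t (PySem.List.pyRange (a : Int) b 1) =
        (if (pvNxt t (data.length : Int) data 0).getD a (data.length : Int) < b
         then some ((pvNxt t (data.length : Int) data 0).getD a (data.length : Int))
         else none) := by
  intro d
  induction d with
  | zero =>
      intro a b ha hyp
      have hnxt : (pvNxt t (data.length : Int) data 0).getD a (data.length : Int) = (data.length : Int) := by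
        rw [pvNxt_getD]; simp; omega
      rw [hnxt] at hyp ⊢
      have hb : b ≤ (data.length : Int) := by
        rcases hyp with h | h
        · exact h
        · omega
      rw [PySem.List.pyRange_one_eq_nil (by omega)]
      simp [pvScanA]
      omega
  | succ d ih =>
      intro a b ha hyp
      have hlt : a < data.length := by omega
      by_cases hab : (a : Int) < b
      · rw [PySem.List.pyRange_one_cons hab]
        simp only [pvScanA, PySem.List.pyGetD_natCast]
        rw [pvNxt_getD]
        simp only [hlt, if_true, zero_add]
        by_cases hle : data.getD a 0 ≤ t
        · rw [if_pos hle, if_pos hle, if_pos hab]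
        · rw [if_neg hle, if_neg hle]
          have hih : b ≤ (data.length : Int) ∨
              (pvNxt t (data.length : Int) data 0).getD (a + 1) (data.length : Int) < (data.length : Int) := by
            rcases hyp with h | h
            · exact Or.inl h
            · refine Or.inr ?_
              rw [pvNxt_getD] at h
              rw [if_pos hlt, if_neg hle] at h
              simpa using h
          have hcast : (a : Int) + 1 = ((a + 1 : Nat) : Int) := by push_cast; ring
          rw [hcast, ih (a + 1) b (by omega) hih]
      · rw [PySem.List.pyRange_one_eq_nil (by omega)]
        have hge := pvNxt_ge t data (d + 1) a ha
        rw [if_neg (by omega)]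
        simp [pvScanA]

theorem findFTG_spec_aux (sensorData : List Int) (ftgvalue : Int) (peak : List Int) (valley : List Int)
    (hpre : Pre_findFTG sensorData ftgvalue peak valley) :
    findFTG sensorData ftgvalue peak valley = findFTG_alt sensorData ftgvalue peak valley := by
  obtain ⟨-, hk⟩ := hpre
  unfold findFTG findFTG_alt
  rw [PySem.List.enumerate_eq_map_pyRange peak 0, List.foldl_map]
  simp only [PySem.List.len_eq]
  refine PySem.List.foldl_congr_mem _ _ _ _ (fun acc k hkmem => ?_)
  rw [PySem.List.mem_pyRange_one] at hkmem
  obtain ⟨hk0, hkm⟩ := hkmem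
  obtain ⟨kn, rfl⟩ : ∃ m : Nat, k = (m : Int) := ⟨k.toNat, (Int.toNat_of_nonneg hk0).symm⟩
  have hknm : kn < peak.length := by exact_mod_cast hkm
  simp only [PySem.List.pyGetD_natCast]
  have hv1 : PySem.List.pyGetD valley ((kn : Int) + 1) 0 = valley.getD (kn + 1) 0 := by
    have : (kn : Int) + 1 = ((kn + 1 : Nat) : Int) := by push_cast; ring
    rw [this, PySem.List.pyGetD_natCast]
  rw [hv1]
  set p := peak.getD kn 0 with hp
  set v := valley.getD (kn + 1) 0 with hv
  by_cases hpv : p < v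
  · obtain ⟨hp0, hcase⟩ := hk kn hknm hpv
    have hpcast : p = (p.toNat : Int) := by omega
    -- p ≤ n in either case
    have hpn : p.toNat ≤ sensorData.length := by
      rcases hcase with h | ⟨j, hj, hpj, _⟩ <;> omega
    have hhyp : v ≤ (sensorData.length : Int) ∨
        (pvNxt ftgvalue (sensorData.length : Int) sensorData 0).getD p.toNat (sensorData.length : Int) < (sensorData.length : Int) := by
      rcases hcase with h | ⟨j, hj, hpj, hjt⟩
      · exact Or.inl h
      · exact Or.inr (pvNxt_lt_of_exists ftgvalue sensorData (sensorData.length - p.toNat) p.toNat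
          (by omega) ⟨j, hj, hpj, hjt⟩)
    have hscan := pvScanA_eq_nxt ftgvalue sensorData (sensorData.length - p.toNat) p.toNat v
      (by omega) hhyp
    rw [hpcast, hscan]
    -- B's lookup equals the table getD
    have hlen : p.toNat < (pvNxt ftgvalue (sensorData.length : Int) sensorData 0).length := by
      rw [pvNxt_length]; omega
    have hlook : PySem.List.pyGetD (pvNxt ftgvalue (sensorData.length : Int) sensorData 0)
        ((p.toNat : Nat) : Int) (sensorData.length : Int)
        = (pvNxt ftgvalue (sensorData.length : Int) sensorData 0).getD p.toNat (sensorData.length : Int) := by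
      rw [PySem.List.pyGetD_natCast]
    rw [hlook]
    have hpv' : ((p.toNat : Int)) < v := by omega
    rw [if_pos hpv']
    by_cases hc : (pvNxt ftgvalue (sensorData.length : Int) sensorData 0).getD p.toNat (sensorData.length : Int) < v
    · rw [if_pos hc, if_pos hc]
    · rw [if_neg hc, if_neg hc]
  · rw [PySem.List.pyRange_one_eq_nil (by omega)]
    simp [pvScanA, hpv]

-- ===== VERDICT (by name: the statement is the Claim_ definition above) =====
theorem findFTG_spec : Claim_equal_findFTG := by
  intro sensorData ftgvalue peak valley _ hpre
  unfold Spec_findFTG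
  exact findFTG_spec_aux sensorData ftgvalue peak valley hpre
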